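-- pv_equiv track=rewrite | github.com/rahulsingh1397/Mitre-Core_v2 | utils/temporal_fragment_merger.py | _are_related_attacks
-- ===== SOURCE A (Python) =====
-- def _are_related_attacks(attack1: str, attack2: str) -> bool:
--     """Check if two attack types are part of same kill chain."""
--     # Define related attack progressions
--     related_groups = [
--         {'scan', 'portscan', 'recon', 'reconnaissance'},
--         {'exploit', 'injection', 'sql', 'xss', 'web'},
--         {'brute', 'password', 'credential'},
--         {'dos', 'ddos', 'flood'},
--         {'mirai', 'bot', 'botnet', 'cnc'},
--         {'backdoor', 'rootkit', 'persistence'}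
--     ]
--
--     attack1_lower = str(attack1).lower()
--     attack2_lower = str(attack2).lower()
--
--     for group in related_groups:
--         if any(a in attack1_lower for a in group) and any(a in attack2_lower for a in group):
--             return True
--
--     return False
-- ===== SOURCE B (Python) =====
-- def _are_related_attacks(attack1: str, attack2: str) -> bool:
--     """Check if two attack types are part of same kill chain."""
--     # Flat keyword table: each keyword carries the bit mask of its group.
--     keyword_bits = [
--         ('scan', 1), ('portscan', 1), ('recon', 1), ('reconnaissance', 1),
--         ('exploit', 2), ('injection', 2), ('sql', 2), ('xss', 2), ('web', 2),
--         ('brute', 4), ('password', 4), ('credential', 4),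
--         ('dos', 8), ('ddos', 8), ('flood', 8),
--         ('mirai', 16), ('bot', 16), ('botnet', 16), ('cnc', 16),
--         ('backdoor', 32), ('rootkit', 32), ('persistence', 32),
--     ]
--     a1 = str(attack1).lower()
--     a2 = str(attack2).lower()
--     m1 = 0
--     m2 = 0
--     for kw, bit in keyword_bits:
--         if kw in a1:
--             m1 |= bit
--         if kw in a2:
--             m2 |= bit
--     return (m1 & m2) != 0
-- ===== Notes on version B (the rewrite author's own statement) =====
-- stated objective: alternative
-- what changed: B replaces A's nested per-group loop (any-over-keywords twice per group, early return) by a single pass over a flat keyword->bitmask table that accumulates one group-membership bitmask per string, answering with a bitwise AND test.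
import Mathlib
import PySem

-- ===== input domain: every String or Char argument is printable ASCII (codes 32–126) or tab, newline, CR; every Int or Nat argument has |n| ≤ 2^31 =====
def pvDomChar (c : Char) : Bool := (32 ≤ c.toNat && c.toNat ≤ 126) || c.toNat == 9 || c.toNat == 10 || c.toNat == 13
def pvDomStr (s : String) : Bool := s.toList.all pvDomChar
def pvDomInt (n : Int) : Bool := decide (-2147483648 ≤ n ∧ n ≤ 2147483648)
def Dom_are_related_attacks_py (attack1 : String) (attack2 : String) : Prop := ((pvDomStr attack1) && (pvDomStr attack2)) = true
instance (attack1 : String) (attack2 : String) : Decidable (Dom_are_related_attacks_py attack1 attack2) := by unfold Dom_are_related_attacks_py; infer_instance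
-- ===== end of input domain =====

-- B replaces A's nested per-group loop by one pass over a flat keyword->bitmask table,
-- accumulating a group-membership bitmask per string and testing their bitwise AND (alternative decomposition, same cost).


-- ===== PORT A =====
-- the six keyword groups A iterates over
def pvGroups : List (List String) := [
  ["scan", "portscan", "recon", "reconnaissance"],
  ["exploit", "injection", "sql", "xss", "web"],
  ["brute", "password", "credential"],
  ["dos", "ddos", "flood"],
  ["mirai", "bot", "botnet", "cnc"],
  ["backdoor", "rootkit", "persistence"]]

-- for group in related_groups: if any(...) and any(...): return True; return False
def are_related_attacks_py (attack1 : String) (attack2 : String) : Bool :=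
  let a1 := PySem.Str.lower attack1
  let a2 := PySem.Str.lower attack2
  pvGroups.any (fun group =>
    group.any (fun a => PySem.Str.isIn a a1) && group.any (fun a => PySem.Str.isIn a a2))

-- ===== PORT B =====
-- flat keyword table with its group's bit mask (Source B's keyword_bits)
def pvKeywordBits : List (String × Int) := [
  ("scan", 1), ("portscan", 1), ("recon", 1), ("reconnaissance", 1),
  ("exploit", 2), ("injection", 2), ("sql", 2), ("xss", 2), ("web", 2),
  ("brute", 4), ("password", 4), ("credential", 4),
  ("dos", 8), ("ddos", 8), ("flood", 8),
  ("mirai", 16), ("bot", 16), ("botnet", 16), ("cnc", 16),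
  ("backdoor", 32), ("rootkit", 32), ("persistence", 32)]

-- the loop body: if kw in a1: m1 |= bit ; if kw in a2: m2 |= bit
def pvStep (a1 a2 : String) (st : Int × Int) (p : String × Int) : Int × Int :=
  (if PySem.Str.isIn p.1 a1 then PySem.Int.bor st.1 p.2 else st.1,
   if PySem.Str.isIn p.1 a2 then PySem.Int.bor st.2 p.2 else st.2)

def are_related_attacks_py_alt (attack1 : String) (attack2 : String) : Bool :=
  let a1 := PySem.Str.lower attack1
  let a2 := PySem.Str.lower attack2
  let mm := pvKeywordBits.foldl (pvStep a1 a2) ((0 : Int), (0 : Int))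
  decide (PySem.Int.band mm.1 mm.2 ≠ 0)

-- ===== PRECONDITION & SPEC =====
def Spec_are_related_attacks_py (attack1 : String) (attack2 : String) (out : Bool) : Prop := out = are_related_attacks_py_alt attack1 attack2
instance (attack1 : String) (attack2 : String) (out : Bool) : Decidable (Spec_are_related_attacks_py attack1 attack2 out) := by unfold Spec_are_related_attacks_py; infer_instance

-- ===== CLAIM (what is proved, stated in full; the proofs are below) =====
def Claim_equal_are_related_attacks_py : Prop := ∀ (attack1 : String) (attack2 : String), Dom_are_related_attacks_py attack1 attack2 → Spec_are_related_attacks_py attack1 attack2 (are_related_attacks_py attack1 attack2)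

-- ===== LEMMAS AND PROOFS =====

theorem pv_bor_nonneg (a b : Int) (ha : 0 ≤ a) (hb : 0 ≤ b) : 0 ≤ PySem.Int.bor a b := by
  rw [PySem.Int.bor_of_nonneg ha hb]; exact Int.natCast_nonneg _

theorem pv_ite_nonneg (b : Bool) (c : Int) (hc : 0 ≤ c) : 0 ≤ if b then c else 0 := by
  split
  · exact hc
  · exact le_refl 0

theorem pv_bor_idem (m c : Int) (hm : 0 ≤ m) (hc : 0 ≤ c) :
    PySem.Int.bor (PySem.Int.bor m c) c = PySem.Int.bor m c := by
  rw [PySem.Int.bor_of_nonneg hm hc, PySem.Int.bor_of_nonneg (Int.natCast_nonneg _) hc]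
  simp

-- folding one segment of constant-mask keywords just ORs the mask in when any keyword matches
theorem pv_seg (a1 a2 : String) (c : Int) (hc : 0 ≤ c) (kws : List String)
    (m : Int × Int) (h1 : 0 ≤ m.1) (h2 : 0 ≤ m.2) :
    (kws.map (fun k => (k, c))).foldl (pvStep a1 a2) m
      = (PySem.Int.bor m.1 (if kws.any (fun k => PySem.Str.isIn k a1) then c else 0),
         PySem.Int.bor m.2 (if kws.any (fun k => PySem.Str.isIn k a2) then c else 0)) := by
  have hor : ∀ (b1 b2 : Bool) (m : Int), 0 ≤ m →
      PySem.Int.bor (if b1 = true then PySem.Int.bor m c else m) (if b2 = true then c else 0)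
        = PySem.Int.bor m (if (b1 || b2) = true then c else 0) := by
    intro b1 b2 m hm
    cases b1 <;> cases b2 <;> simp [pv_bor_idem m c hm hc]
  induction kws generalizing m with
  | nil => simp
  | cons k ks ih =>
    simp only [List.map_cons, List.foldl_cons, List.any_cons]
    rw [ih (pvStep a1 a2 m (k, c))
      (by unfold pvStep; dsimp only; split
          · exact pv_bor_nonneg _ _ h1 hc
          · exact h1)
      (by unfold pvStep; dsimp only; split
          · exact pv_bor_nonneg _ _ h2 hc
          · exact h2)]
    unfold pvStep
    dsimp only
    congr 1
    · exact hor _ _ m.1 h1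
    · exact hor _ _ m.2 h2

-- the two exact result shapes agree for every combination of the twelve group-match booleans
theorem pv_bits (x0 x1 x2 x3 x4 x5 y0 y1 y2 y3 y4 y5 : Bool) :
    decide (PySem.Int.band
      (PySem.Int.bor (PySem.Int.bor (PySem.Int.bor (PySem.Int.bor (PySem.Int.bor (PySem.Int.bor 0
        (if x0 then (1:Int) else 0)) (if x1 then 2 else 0)) (if x2 then 4 else 0))
        (if x3 then 8 else 0)) (if x4 then 16 else 0)) (if x5 then 32 else 0))
      (PySem.Int.bor (PySem.Int.bor (PySem.Int.bor (PySem.Int.bor (PySem.Int.bor (PySem.Int.bor 0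
        (if y0 then (1:Int) else 0)) (if y1 then 2 else 0)) (if y2 then 4 else 0))
        (if y3 then 8 else 0)) (if y4 then 16 else 0)) (if y5 then 32 else 0)) ≠ 0)
    = (x0 && y0 || (x1 && y1 || (x2 && y2 || (x3 && y3 || (x4 && y4 || (x5 && y5 || false)))))) := by
  revert x0 x1 x2 x3 x4 x5 y0 y1 y2 y3 y4 y5; decide

-- the two algorithms agree for arbitrary (already lowered) strings
theorem pv_key (a1 a2 : String) :
    (pvGroups.any (fun group =>
        group.any (fun a => PySem.Str.isIn a a1) && group.any (fun a => PySem.Str.isIn a a2)))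
    = decide (PySem.Int.band
        (pvKeywordBits.foldl (pvStep a1 a2) ((0 : Int), (0 : Int))).1
        (pvKeywordBits.foldl (pvStep a1 a2) ((0 : Int), (0 : Int))).2 ≠ 0) := by
  have hsplit : pvKeywordBits
      = (["scan", "portscan", "recon", "reconnaissance"].map (fun k => (k, (1:Int))))
      ++ (["exploit", "injection", "sql", "xss", "web"].map (fun k => (k, (2:Int))))
      ++ (["brute", "password", "credential"].map (fun k => (k, (4:Int))))
      ++ (["dos", "ddos", "flood"].map (fun k => (k, (8:Int))))
      ++ (["mirai", "bot", "botnet", "cnc"].map (fun k => (k, (16:Int))))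
      ++ (["backdoor", "rootkit", "persistence"].map (fun k => (k, (32:Int)))) := by rfl
  rw [hsplit]
  rw [List.foldl_append, List.foldl_append, List.foldl_append, List.foldl_append,
    List.foldl_append]
  rw [pv_seg a1 a2 1 (by norm_num) _ _ ?_ ?_]
  rw [pv_seg a1 a2 2 (by norm_num) _ _ ?_ ?_]
  rw [pv_seg a1 a2 4 (by norm_num) _ _ ?_ ?_]
  rw [pv_seg a1 a2 8 (by norm_num) _ _ ?_ ?_]
  rw [pv_seg a1 a2 16 (by norm_num) _ _ ?_ ?_]
  rw [pv_seg a1 a2 32 (by norm_num) _ _ ?_ ?_]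
  · simp only [pvGroups, List.any_cons, List.any_nil]
    exact (pv_bits _ _ _ _ _ _ _ _ _ _ _ _).symm
  all_goals dsimp only
  all_goals repeat' first | apply pv_bor_nonneg | apply pv_ite_nonneg | norm_num

-- ===== VERDICT (by name: the statement is the Claim_ definition above) =====
theorem are_related_attacks_py_spec : Claim_equal_are_related_attacks_py := by
  intro attack1 attack2 _
  unfold Spec_are_related_attacks_py are_related_attacks_py are_related_attacks_py_alt
  exact pv_key (PySem.Str.lower attack1) (PySem.Str.lower attack2)
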